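-- pv_equiv track=rewrite | github.com/neuven/openllm | preprocess.py | cut_by_ngram
-- ===== SOURCE A (Python) =====
-- def cut_by_ngram(sentence, min_n, max_n):
--     punctuation = r"""!"#$%&'()*+,-./:;<=>?@[\]^_`{|}~“”？，！【】（）、。：；’‘……￥·"""
--     punc_dicts = [i for i in punctuation]
--     rst = []
--     # 遍历切分长度的规划
--     for length in range(min_n, min(len(sentence), max_n) + 1):
--         # 依照此刻切分长度进行切分
--         for idx in range(0, len(sentence) - length + 1):
--             add_sent = ""
--             add_choice = True
--             #去除标点
--             for sent in sentence[idx: idx + length]: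
--                 if sent in punc_dicts :
--                     add_choice = False
--                     continue
--                 else:
--                     add_sent = add_sent +" "+sent
--             if add_choice:
--                 rst.append(add_sent[1:])
--     return rst
-- ===== SOURCE B (Python) =====
-- def cut_by_ngram(sentence, min_n, max_n):
--     punctuation = r"""!"#$%&'()*+,-./:;<=>?@[\]^_`{|}~“”？，！【】（）、。：；’‘……￥·"""
--     punct = set(punctuation)
--     n = len(sentence)
--     # prefix[i] = number of punctuation characters among the first i characters;
--     # a window is punctuation-free iff the prefix count does not grow across it.
--     prefix = [0]
--     for ch in sentence:
--         prefix.append(prefix[-1] + (1 if ch in punct else 0))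
--     rst = []
--     for length in range(max(min_n, 1), min(n, max_n) + 1):
--         for idx in range(n - length + 1):
--             if prefix[idx + length] == prefix[idx]:
--                 rst.append(" ".join(sentence[idx:idx + length]))
--     return rst
-- ===== Notes on version B (the rewrite author's own statement) =====
-- stated objective: faster
-- what changed: Replaces A's per-window character scan (membership test plus char-by-char string concatenation for every window) by a prefix-sum table of punctuation counts giving an O(1) validity check per window, set membership, and a single join only for valid windows.
-- outside the precondition, e.g. on cut_by_ngram('', 0, 0): A returns [''], B returns []
import Mathlib
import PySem

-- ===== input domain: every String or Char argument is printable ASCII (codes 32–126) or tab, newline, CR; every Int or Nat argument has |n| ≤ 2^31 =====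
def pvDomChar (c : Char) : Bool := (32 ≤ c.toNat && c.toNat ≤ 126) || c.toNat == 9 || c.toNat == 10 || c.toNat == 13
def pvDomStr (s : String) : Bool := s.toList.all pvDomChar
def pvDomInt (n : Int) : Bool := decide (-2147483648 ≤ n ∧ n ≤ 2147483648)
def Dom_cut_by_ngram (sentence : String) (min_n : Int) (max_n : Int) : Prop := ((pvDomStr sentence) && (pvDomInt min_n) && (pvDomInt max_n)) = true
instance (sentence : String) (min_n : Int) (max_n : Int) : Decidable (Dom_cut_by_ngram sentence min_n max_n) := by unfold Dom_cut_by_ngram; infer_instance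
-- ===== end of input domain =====

-- B replaces A's per-window character scan (and char-by-char string building) by a
-- prefix-sum table of punctuation counts: O(1) validity check per window, one join per
-- valid window only (measured faster).  Equivalence is claimed on Pre_ (min_n ≥ 1).

-- ===== PORT A =====
-- the module-level punctuation string of A ('punctuation' / 'punc_dicts' as a char list)
def pvPunct : List Char :=
  "!\"#$%&'()*+,-./:;<=>?@[\\]^_`{|}~“”？，！【】（）、。：；’‘……￥·".toList

def cut_by_ngram (sentence : String) (min_n : Int) (max_n : Int) : List String :=
  (PySem.List.pyRange min_n (min (sentence.toList.length : Int) max_n + 1) 1).foldl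
    (fun rst length =>
      (PySem.List.pyRange 0 ((sentence.toList.length : Int) - length + 1) 1).foldl
        (fun rst idx =>
          -- the inner character loop: (add_sent, add_choice), add_sent kept as List Char
          let p := (PySem.List.slice sentence.toList (some idx) (some (idx + length))).foldl
            (fun (q : List Char × Bool) sent =>
              if sent ∈ pvPunct then (q.1, false)
              else (q.1 ++ [' '] ++ [sent], q.2)) ([], true)
          if p.2 then rst ++ [String.mk (PySem.List.slice p.1 (some 1) none)] else rst)
        rst)
    []

-- ===== PORT B =====
-- punct = set(punctuation)
def pvPunctSet : PySem.Set Char := PySem.Set.ofList pvPunct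

-- prefix[i] = number of punctuation characters among the first i characters
def pvPrefix (s : List Char) : List Int :=
  s.foldl (fun p ch => p ++ [PySem.List.pyGetD p (-1) 0 + (if ch ∈ pvPunctSet then 1 else 0)]) [0]

def cut_by_ngram_alt (sentence : String) (min_n : Int) (max_n : Int) : List String :=
  (PySem.List.pyRange (max min_n 1) (min (sentence.toList.length : Int) max_n + 1) 1).foldl
    (fun rst length =>
      (PySem.List.pyRange 0 ((sentence.toList.length : Int) - length + 1) 1).foldl
        (fun rst idx =>
          -- prefix[idx+length] == prefix[idx]; both indices are always in range here,
          -- so pyGetD is exact for Python's prefix[·]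
          if PySem.List.pyGetD (pvPrefix sentence.toList) (idx + length) 0
              = PySem.List.pyGetD (pvPrefix sentence.toList) idx 0 then
            rst ++ [String.mk (PySem.Chars.join [' ']
              ((PySem.List.slice sentence.toList (some idx) (some (idx + length))).map
                (fun c => [c])))]
          else rst)
        rst)
    []

-- ===== PRECONDITION & SPEC =====
-- Pre_ restricts to the task's natural domain: n-gram lengths start at 1.  For min_n ≤ 0
-- A still returns, but what it emits there are artifacts of Python's negative slice
-- bounds (runs of empty strings and end-wrapped windows); B emits only the
-- positive-length n-grams there.
def Pre_cut_by_ngram (sentence : String) (min_n : Int) (max_n : Int) : Prop := 1 ≤ min_n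
instance (sentence : String) (min_n : Int) (max_n : Int) : Decidable (Pre_cut_by_ngram sentence min_n max_n) := by unfold Pre_cut_by_ngram; infer_instance

def pvWitness_cut_by_ngram : String × Int × Int := ("ab, cd", 1, 2)

def Spec_cut_by_ngram (sentence : String) (min_n : Int) (max_n : Int) (out : List String) : Prop := out = cut_by_ngram_alt sentence min_n max_n
instance (sentence : String) (min_n : Int) (max_n : Int) (out : List String) : Decidable (Spec_cut_by_ngram sentence min_n max_n out) := by unfold Spec_cut_by_ngram; infer_instance

-- ===== CLAIM (what is proved, stated in full; the proofs are below) =====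
def Claim_equal_cut_by_ngram : Prop := ∀ (sentence : String) (min_n : Int) (max_n : Int), Dom_cut_by_ngram sentence min_n max_n → Pre_cut_by_ngram sentence min_n max_n → Spec_cut_by_ngram sentence min_n max_n (cut_by_ngram sentence min_n max_n)

-- ===== LEMMAS AND PROOFS =====

lemma mem_pvPunctSet (c : Char) : c ∈ pvPunctSet ↔ c ∈ pvPunct :=
  PySem.Set.mem_ofList pvPunct c

-- A's inner character loop, characterised: it filters out punctuation while building
-- the space-prefixed concatenation, and records in the flag whether none was seen.
lemma innerA_eq (w : List Char) (a0 : List Char) (b0 : Bool) :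
    w.foldl (fun (q : List Char × Bool) sent =>
        if sent ∈ pvPunct then (q.1, false)
        else (q.1 ++ [' '] ++ [sent], q.2)) (a0, b0)
    = (a0 ++ (w.filter (fun c => !decide (c ∈ pvPunct))).flatMap (fun c => [' ', c]),
       b0 && w.all (fun c => !decide (c ∈ pvPunct))) := by
  induction w generalizing a0 b0 with
  | nil => simp
  | cons c t ih =>
    simp only [List.foldl_cons]
    by_cases hcp : c ∈ pvPunct
    · rw [if_pos hcp, ih]
      simp [hcp]
    · rw [if_neg hcp, ih]
      simp [hcp]

-- dropping the leading space of A's concatenation is exactly " ".join of the characters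
lemma tail_flatMap_eq_join (w : List Char) :
    (w.flatMap (fun c => [' ', c])).tail
      = PySem.Chars.join [' '] (w.map (fun c => [c])) := by
  induction w with
  | nil => simp [PySem.Chars.join_nil]
  | cons c t ih =>
    cases t with
    | nil => simp [PySem.Chars.join_singleton]
    | cons d t' =>
      have ih' := ih
      simp only [List.map_cons] at ih' ⊢
      rw [PySem.Chars.join_cons_cons, ← ih']
      simp [List.flatMap_cons]

-- B's prefix-count loop, characterised with a generalized accumulator
set_option maxRecDepth 8192 in
lemma pvPrefix_go (s : List Char) : ∀ (acc : List Int) (t : Int),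
    PySem.List.pyGetD acc (-1) 0 = t →
    s.foldl (fun p ch => p ++ [PySem.List.pyGetD p (-1) 0 + (if ch ∈ pvPunctSet then 1 else 0)]) acc
      = acc ++ (List.range s.length).map
          (fun i => t + (((s.take (i + 1)).countP (fun c => decide (c ∈ pvPunct)) : Nat) : Int)) := by
  induction s with
  | nil => intro acc t ht; simp
  | cons c cs ih =>
    intro acc t ht
    simp only [List.foldl_cons]
    beta_reduce
    rw [ht, ih (acc ++ [t + (if c ∈ pvPunctSet then 1 else 0)])
           (t + (if c ∈ pvPunctSet then 1 else 0))
           (PySem.List.pyGetD_neg_one_append_singleton acc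
             (t + (if c ∈ pvPunctSet then 1 else 0)) 0)]
    simp only [List.length_cons]
    rw [List.append_assoc]
    congr 1
    rw [List.range_succ_eq_map, List.map_cons, List.map_map, List.singleton_append]
    congr 1
    · by_cases hcp : c ∈ pvPunct <;>
        simp [hcp, mem_pvPunctSet, List.countP_cons]
    · apply List.map_congr_left
      intro i _
      simp only [Function.comp_apply, List.take_succ_cons, List.countP_cons,
        Nat.succ_eq_add_one]
      by_cases hcp : c ∈ pvPunct <;>
        simp [hcp, mem_pvPunctSet] <;> push_cast <;> ring

lemma pvPrefix_eq (s : List Char) :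
    pvPrefix s = (List.range (s.length + 1)).map
      (fun i => (((s.take i).countP (fun c => decide (c ∈ pvPunct)) : Nat) : Int)) := by
  unfold pvPrefix
  rw [pvPrefix_go s [0] 0 rfl]
  rw [List.range_succ_eq_map, List.map_cons, List.map_map, List.singleton_append]
  all_goals congr 1
  all_goals simp [Function.comp]

lemma prefAt (s : List Char) (i : Nat) (hi : i ≤ s.length) :
    PySem.List.pyGetD (pvPrefix s) (i : Int) 0
      = (((s.take i).countP (fun c => decide (c ∈ pvPunct)) : Nat) : Int) := by
  rw [pvPrefix_eq, PySem.List.pyGetD_natCast]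
  exact PySem.List.getD_map_range _ _ _ _ (by omega)

-- B's O(1) test "prefix[idx+length] == prefix[idx]" says exactly "the window is clean"
lemma cond_iff (s : List Char) (a l : Nat) (h : a + l ≤ s.length) :
    (PySem.List.pyGetD (pvPrefix s) ((a : Int) + (l : Int)) 0
       = PySem.List.pyGetD (pvPrefix s) (a : Int) 0)
    ↔ ((s.drop a).take l).countP (fun c => decide (c ∈ pvPunct)) = 0 := by
  rw [show ((a : Int) + (l : Int)) = (((a + l : Nat)) : Int) by push_cast; ring]
  rw [prefAt s (a + l) h, prefAt s a (by omega), List.take_add, List.countP_append]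
  constructor <;> intro h' <;> omega

-- the two per-window bodies agree
set_option maxRecDepth 8192 in
lemma body_eq (s : List Char) (a l : Nat) (h : a + l ≤ s.length) (rst : List String) :
    (let p := (PySem.List.slice s (some (a : Int)) (some ((a : Int) + (l : Int)))).foldl
        (fun (q : List Char × Bool) sent =>
          if sent ∈ pvPunct then (q.1, false)
          else (q.1 ++ [' '] ++ [sent], q.2)) ([], true)
      if p.2 then rst ++ [String.mk (PySem.List.slice p.1 (some 1) none)] else rst)
    = (if PySem.List.pyGetD (pvPrefix s) ((a : Int) + (l : Int)) 0
           = PySem.List.pyGetD (pvPrefix s) (a : Int) 0 then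
        rst ++ [String.mk (PySem.Chars.join [' ']
          ((PySem.List.slice s (some (a : Int)) (some ((a : Int) + (l : Int)))).map
            (fun c => [c])))]
      else rst) := by
  rw [PySem.List.slice_natCast_add]
  set w : List Char := (s.drop a).take l with hw
  dsimp only
  rw [innerA_eq]
  by_cases hc : ∀ c ∈ w, c ∉ pvPunct
  · have hall : (w.all fun c => !decide (c ∈ pvPunct)) = true := by
      simp only [List.all_eq_true]
      intro c hcw
      simp [hc c hcw]
    have hcnt : w.countP (fun c => decide (c ∈ pvPunct)) = 0 :=
      List.countP_eq_zero.mpr (by intro c hcw; simp [hc c hcw])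
    have hfil : w.filter (fun c => !decide (c ∈ pvPunct)) = w :=
      List.filter_eq_self.mpr (by intro c hcw; simp [hc c hcw])
    have hcondB := (cond_iff s a l h).mpr hcnt
    simp [hall, hfil, hcondB, PySem.List.slice_from_one, tail_flatMap_eq_join]
  · push_neg at hc
    obtain ⟨c, hcw, hcp⟩ := hc
    have hall : (w.all fun c => !decide (c ∈ pvPunct)) = false := by
      simp only [List.all_eq_false]
      exact ⟨c, hcw, by simp [hcp]⟩
    have hcondB : ¬ (PySem.List.pyGetD (pvPrefix s) ((a : Int) + (l : Int)) 0
        = PySem.List.pyGetD (pvPrefix s) (a : Int) 0) := by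
      intro he
      have h0 := (cond_iff s a l h).mp he
      have := List.countP_eq_zero.mp h0 c hcw
      simp [hcp] at this
    rw [if_neg hcondB]
    simp [hall]

-- ===== VERDICT (by name: the statement is the Claim_ definition above) =====
theorem cut_by_ngram_spec : Claim_equal_cut_by_ngram := by
  intro sentence min_n max_n hdom hpre
  have hpre' : 1 ≤ min_n := hpre
  show cut_by_ngram sentence min_n max_n = cut_by_ngram_alt sentence min_n max_n
  unfold cut_by_ngram cut_by_ngram_alt
  rw [max_eq_left hpre']
  apply PySem.List.foldl_congr_mem
  intro rst L hL
  rw [PySem.List.mem_pyRange_one] at hL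
  have hmin := min_le_left (sentence.toList.length : Int) max_n
  have hLn : L ≤ (sentence.toList.length : Int) := by omega
  have hL1 : 1 ≤ L := le_trans hpre' hL.1
  apply PySem.List.foldl_congr_mem
  intro rst' idx hidx
  rw [PySem.List.mem_pyRange_one] at hidx
  obtain ⟨a, rfl⟩ : ∃ a : Nat, idx = (a : Int) := ⟨idx.toNat, by omega⟩
  obtain ⟨l, rfl⟩ : ∃ l : Nat, L = (l : Int) := ⟨L.toNat, by omega⟩
  exact body_eq sentence.toList a l (by omega) rst'
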